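-- pv_equiv track=rewrite | github.com/PogromcaPapai/Larch | app/FormalSystem/int_seqcal.py | is_sequent
-- ===== SOURCE A (Python) =====
-- def is_sequent(l, s) -> bool:
--     buffor = []
--     for i in l:
--         if i.startswith('sep_'):
--             if buffor == s:
--                 return True
--             else:
--                 buffor = []
--         else:
--             buffor.append(i)
--     if buffor == s:
--         return True
--     return False
-- ===== SOURCE B (Python) =====
-- def is_sequent(l, s) -> bool:
--     # Anchored pattern search: s can only be a segment if it is separator-free;
--     # then s is a segment iff it occurs at some position i that starts right
--     # after a separator (or at the front) and ends right before one (or at the end).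
--     if any(x.startswith('sep_') for x in s):
--         return False
--     n, m = len(l), len(s)
--     return any(
--         (i == 0 or l[i - 1].startswith('sep_'))
--         and l[i:i + m] == s
--         and (i + m == n or l[i + m].startswith('sep_'))
--         for i in range(n - m + 1))
-- ===== Notes on version B (the rewrite author's own statement) =====
-- stated objective: alternative
-- what changed: B replaces A's buffer-accumulating scan by an anchored pattern search: after a one-time check that s is separator-free, it tests every start index i with slicing whether s occurs at i flanked by separators (or list ends), with no buffer or segment list at all.
import Mathlib
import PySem

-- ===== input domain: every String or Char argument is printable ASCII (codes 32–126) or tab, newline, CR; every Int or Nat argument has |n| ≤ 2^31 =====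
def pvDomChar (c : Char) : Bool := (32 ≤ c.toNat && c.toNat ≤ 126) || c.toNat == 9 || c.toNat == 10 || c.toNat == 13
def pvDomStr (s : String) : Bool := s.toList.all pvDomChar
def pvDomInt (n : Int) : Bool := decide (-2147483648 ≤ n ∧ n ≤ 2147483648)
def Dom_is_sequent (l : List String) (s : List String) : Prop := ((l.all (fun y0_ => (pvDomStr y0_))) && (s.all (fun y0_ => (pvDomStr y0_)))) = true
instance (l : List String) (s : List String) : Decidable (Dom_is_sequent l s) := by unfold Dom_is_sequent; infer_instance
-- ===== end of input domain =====

-- B replaces A's buffer-accumulating scan by an anchored pattern search (slice match at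
-- separator-flanked start positions, after a one-time separator-freeness check on s);
-- alternative decomposition, same cost class.


-- ===== PORT A =====
-- i.startswith('sep_') (shared between the two Pythons' sources)
def pvSep (x : String) : Bool := PySem.Str.startswith x "sep_"

-- A's for-loop with early return, as structural recursion over l carrying the buffer
def isSequentLoopA (l : List String) (s : List String) (buffor : List String) : Bool :=
  match l with
  | [] => buffor == s
  | i :: t =>
    if pvSep i then
      if buffor == s then true else isSequentLoopA t s []
    else
      isSequentLoopA t s (buffor ++ [i])

def is_sequent (l : List String) (s : List String) : Bool :=
  isSequentLoopA l s []

-- ===== PORT B =====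
-- l[j].startswith('sep_') behind a bounds guard (the guard in Source B keeps j in range)
def pvOptSep (o : Option String) : Bool :=
  match o with
  | some x => pvSep x
  | none => false

-- Source B: separator-freeness precheck, then any() of anchored slice matches over range(n-m+1)
def is_sequent_alt (l : List String) (s : List String) : Bool :=
  if s.any pvSep then false
  else
    let n : Int := l.length
    let m : Int := s.length
    (PySem.List.pyRange 0 (n - m + 1) 1).any (fun i =>
      (i == 0 || pvOptSep (PySem.List.pyGet? l (i - 1)))
      && (PySem.List.slice l (some i) (some (i + m)) == s)
      && (i + m == n || pvOptSep (PySem.List.pyGet? l (i + m))))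

-- ===== PRECONDITION & SPEC =====
def Spec_is_sequent (l : List String) (s : List String) (out : Bool) : Prop := out = is_sequent_alt l s
instance (l : List String) (s : List String) (out : Bool) : Decidable (Spec_is_sequent l s out) := by unfold Spec_is_sequent; infer_instance

-- ===== CLAIM (what is proved, stated in full; the proofs are below) =====
def Claim_equal_is_sequent : Prop := ∀ (l : List String) (s : List String), Dom_is_sequent l s → Spec_is_sequent l s (is_sequent l s)

-- ===== LEMMAS AND PROOFS =====

-- proof-side list of segments of l (cut at separators, empty segments kept)
def pvSegs (l : List String) : List (List String) :=
  match l with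
  | [] => [[]]
  | x :: t => if pvSep x then [] :: pvSegs t else (x :: (pvSegs t).headI) :: (pvSegs t).tail

theorem pvSegs_ne_nil (l : List String) : pvSegs l ≠ [] := by
  cases l with
  | nil => simp [pvSegs]
  | cons x t => simp only [pvSegs]; split_ifs <;> simp

theorem pvSegs_cons (l : List String) : pvSegs l = (pvSegs l).headI :: (pvSegs l).tail := by
  cases h : pvSegs l with
  | nil => exact absurd h (pvSegs_ne_nil l)
  | cons a r => simp

-- every token inside any segment is non-separator
theorem pvSegs_sepfree (l : List String) : ∀ g ∈ pvSegs l, ∀ x ∈ g, pvSep x = false := by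
  induction l with
  | nil => intro g hg x hx; simp [pvSegs] at hg; subst hg; simp at hx
  | cons a t ih =>
    intro g hg x hx
    simp only [pvSegs] at hg
    split_ifs at hg with ha
    · rcases List.mem_cons.mp hg with rfl | hg
      · simp at hx
      · exact ih g hg x hx
    · rcases List.mem_cons.mp hg with rfl | hg
      · rcases List.mem_cons.mp hx with rfl | hx'
        · simpa using ha
        · exact ih _ (by rw [pvSegs_cons t]; exact List.mem_cons_self) x hx'
      · exact ih g (by rw [pvSegs_cons t]; exact List.mem_cons_of_mem _ hg) x hx

-- A's loop computed through the segment list: buffer prefixes the first segment only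
theorem loopA_eq_segs (l : List String) (s : List String) (buf : List String) :
    isSequentLoopA l s buf
      = (((buf ++ (pvSegs l).headI) == s) || ((pvSegs l).tail).any (· == s)) := by
  induction l generalizing buf with
  | nil => simp [isSequentLoopA, pvSegs]
  | cons x t ih =>
    simp only [isSequentLoopA, pvSegs]
    split_ifs with hx hb
    · simp [hb]
    · simp only [ih []]
      have hb' : (buf == s) = false := beq_eq_false_iff_ne.mpr (by simpa using hb)
      conv_rhs => rw [pvSegs_cons t]
      simp [hb', List.any_cons]
    · rw [ih (buf ++ [x])]
      simp

theorem isSequent_eq_mem (l : List String) (s : List String) :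
    is_sequent l s = true ↔ s ∈ pvSegs l := by
  rw [is_sequent, loopA_eq_segs]
  conv_rhs => rw [pvSegs_cons l]
  simp only [List.nil_append, Bool.or_eq_true, beq_iff_eq, List.any_eq_true, List.mem_cons]
  constructor
  · rintro (h | ⟨g, hg, rfl⟩)
    · exact Or.inl h.symm
    · exact Or.inr hg
  · rintro (rfl | hg)
    · exact Or.inl rfl
    · exact Or.inr ⟨s, hg, rfl⟩

-- Nat-indexed anchored match: what Source B's generator tests at position j
def pvAnch (l : List String) (s : List String) (j : Nat) : Bool :=
  (decide (j = 0) || pvOptSep l[j - 1]?)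
  && ((l.drop j).take s.length == s)
  && (decide (j + s.length = l.length) || pvOptSep l[j + s.length]?)

theorem pvAnch_bound (l s : List String) (j : Nat) (h : pvAnch l s j = true) :
    j + s.length ≤ l.length := by
  simp only [pvAnch, Bool.and_eq_true, beq_iff_eq] at h
  obtain ⟨⟨-, hmid⟩, hend⟩ := h
  have hlen : min s.length (l.length - j) = s.length := by
    conv_rhs => rw [← hmid]; simp
  by_cases h' : j + s.length ≤ l.length
  · exact h'
  · exfalso
    rw [Nat.not_le] at h'
    rcases Bool.or_eq_true .. |>.mp hend with he | he
    · simp at he; omega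
    · have : l[j + s.length]? = none := List.getElem?_eq_none (by omega)
      rw [this] at he; simp [pvOptSep] at he

-- shifting an anchored match past the head of the list (head is a separator, or j+1 ≥ 2)
theorem pvAnch_shift (x : String) (t s : List String) (j : Nat) (h1 : j = 0 → pvSep x = true) :
    pvAnch (x :: t) s (j + 1) = pvAnch t s j := by
  have e3 : j + 1 + s.length = (j + s.length) + 1 := by omega
  have ed : decide (j + s.length + 1 = t.length + 1) = decide (j + s.length = t.length) :=
    decide_eq_decide.mpr (by omega)
  have efirst : (decide (j + 1 = 0) || pvOptSep (x :: t)[j + 1 - 1]?)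
      = (decide (j = 0) || pvOptSep t[j - 1]?) := by
    cases j with
    | zero => simp [pvOptSep, h1 rfl]
    | succ k => simp
  simp only [pvAnch, List.drop_succ_cons, List.length_cons, e3, List.getElem?_cons_succ,
    efirst, ed]

-- core: anchored matches characterise head/tail segments, for separator-free s
theorem pvAnch_segs (l : List String) : ∀ (s : List String), (∀ x ∈ s, pvSep x = false) →
    ((pvAnch l s 0 = true ↔ (pvSegs l).headI = s) ∧
     ((∃ j, pvAnch l s (j + 1) = true) ↔ s ∈ (pvSegs l).tail)) := by
  induction l with
  | nil =>
    intro s hfree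
    refine ⟨?_, ?_⟩
    · cases s with
      | nil => simp [pvAnch, pvSegs]
      | cons y s' => simp [pvAnch, pvSegs]
    · constructor
      · rintro ⟨j, hj⟩
        simp [pvAnch, pvOptSep] at hj
      · intro h; simp [pvSegs] at h
  | cons x t ih =>
    intro s hfree
    cases hx : pvSep x with
    | true =>
      have hsegs : pvSegs (x :: t) = [] :: pvSegs t := by simp [pvSegs, hx]
      refine ⟨?_, ?_⟩
      · rw [hsegs]
        cases s with
        | nil => simp [pvAnch, pvOptSep, hx]
        | cons y s' =>
          simp only [List.headI_cons]
          constructor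
          · intro h
            exfalso
            simp only [pvAnch, Bool.and_eq_true] at h
            have hmid := h.1.2
            simp only [List.drop_zero, List.length_cons, List.take_succ_cons, beq_iff_eq,
              List.cons.injEq] at hmid
            have hy : pvSep y = false := hfree y List.mem_cons_self
            rw [hmid.1] at hx; rw [hx] at hy; exact Bool.true_eq_false.mp hy
          · intro h; exact absurd h (by simp)
      · rw [hsegs]
        simp only [List.tail_cons]
        have hsh : ∀ j, pvAnch (x :: t) s (j + 1) = pvAnch t s j :=
          fun j => pvAnch_shift x t s j (fun _ => hx)
        constructor
        · rintro ⟨j, hj⟩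
          rw [hsh j] at hj
          rw [pvSegs_cons t]
          cases j with
          | zero => exact List.mem_cons.mpr (Or.inl ((ih s hfree).1.mp hj).symm)
          | succ k => exact List.mem_cons.mpr (Or.inr ((ih s hfree).2.mp ⟨k, hj⟩))
        · intro hm
          rw [pvSegs_cons t] at hm
          rcases List.mem_cons.mp hm with h | hm'
          · exact ⟨0, by rw [hsh 0]; exact (ih s hfree).1.mpr h.symm⟩
          · obtain ⟨k, hk⟩ := (ih s hfree).2.mpr hm'
            exact ⟨k + 1, by rw [hsh (k + 1)]; exact hk⟩
    | false =>
      have hsegs : pvSegs (x :: t) = (x :: (pvSegs t).headI) :: (pvSegs t).tail := by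
        simp [pvSegs, hx]
      refine ⟨?_, ?_⟩
      · rw [hsegs]
        cases s with
        | nil => simp [pvAnch, pvOptSep, hx]
        | cons y s' =>
          have hfree' : ∀ z ∈ s', pvSep z = false := fun z hz => hfree z (List.mem_cons_of_mem _ hz)
          have e1 : pvAnch (x :: t) (y :: s') 0 = ((x == y) && pvAnch t s' 0) := by
            simp only [pvAnch, List.drop_zero, List.take_succ_cons, List.cons_beq_cons,
              List.length_cons]
            have eg : (x :: t)[0 + (s'.length + 1)]? = t[0 + s'.length]? := by
              have : 0 + (s'.length + 1) = (0 + s'.length) + 1 := by omega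
              rw [this, List.getElem?_cons_succ]
            rw [eg]
            simp [Bool.and_assoc]
          rw [e1]
          simp only [List.headI_cons, Bool.and_eq_true, beq_iff_eq, List.cons.injEq]
          rw [(ih s' hfree').1]
      · rw [hsegs]
        simp only [List.tail_cons]
        constructor
        · rintro ⟨j, hj⟩
          cases j with
          | zero =>
            exfalso
            simp only [pvAnch, Bool.and_eq_true, Bool.or_eq_true] at hj
            rcases hj.1.1 with h0 | h0
            · simp at h0
            · simp only [Nat.add_sub_cancel, List.getElem?_cons_zero, pvOptSep] at h0
              rw [hx] at h0; exact Bool.false_eq_true.mp h0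
          | succ k =>
            have := pvAnch_shift x t s (k + 1) (fun h => absurd h (Nat.succ_ne_zero k))
            rw [this] at hj
            exact (ih s hfree).2.mp ⟨k, hj⟩
        · intro hm
          obtain ⟨k, hk⟩ := (ih s hfree).2.mpr hm
          have := pvAnch_shift x t s (k + 1) (fun h => absurd h (Nat.succ_ne_zero k))
          exact ⟨k + 1, by rw [this]; exact hk⟩

-- bridge: Source B's Int-indexed generator term at i = ↑j is exactly pvAnch at j
theorem pvF_eq_anch (l s : List String) (j : Nat) :
    (((↑j : Int) == 0 || pvOptSep (PySem.List.pyGet? l ((↑j : Int) - 1)))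
     && (PySem.List.slice l (some (↑j : Int)) (some ((↑j : Int) + (↑s.length : Int))) == s)
     && (((↑j : Int) + (↑s.length : Int) == (↑l.length : Int))
         || pvOptSep (PySem.List.pyGet? l ((↑j : Int) + (↑s.length : Int)))))
    = pvAnch l s j := by
  have emid : PySem.List.slice l (some (↑j : Int)) (some ((↑j : Int) + (↑s.length : Int)))
      = (l.drop j).take s.length := PySem.List.slice_natCast_add l j s.length
  have ecast : ((↑j : Int) + (↑s.length : Int)) = ((j + s.length : Nat) : Int) := by push_cast; ring
  have e3a : ((↑j : Int) + (↑s.length : Int) == (↑l.length : Int)) = decide (j + s.length = l.length) := by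
    rw [Bool.eq_iff_iff]; simp only [beq_iff_eq, decide_eq_true_eq]; omega
  have e3b : PySem.List.pyGet? l ((↑j : Int) + (↑s.length : Int)) = l[j + s.length]? := by
    rw [ecast, PySem.List.pyGet?_natCast]
  have e1 : ((↑j : Int) == 0 || pvOptSep (PySem.List.pyGet? l ((↑j : Int) - 1)))
      = (decide (j = 0) || pvOptSep l[j - 1]?) := by
    cases j with
    | zero => simp
    | succ k =>
      have h1 : (((k + 1 : Nat) : Int) - 1) = ((k : Nat) : Int) := by push_cast; ring
      have hz : (((k + 1 : Nat) : Int) == (0 : Int)) = false := by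
        rw [Bool.eq_false_iff]; simp only [ne_eq, beq_iff_eq]; omega
      rw [h1, PySem.List.pyGet?_natCast, hz]
      simp
  rw [pvAnch, emid, e3a, e3b, e1]

theorem isSequentAlt_eq (l s : List String) :
    is_sequent_alt l s = true ↔ (∀ x ∈ s, pvSep x = false) ∧ ∃ j, pvAnch l s j = true := by
  cases hs : s.any pvSep with
  | true =>
    simp only [is_sequent_alt, hs, if_true]
    obtain ⟨x, hx, hxs⟩ := List.any_eq_true.mp hs
    constructor
    · intro h; exact absurd h (by simp)
    · rintro ⟨hfree, -⟩
      rw [hfree x hx] at hxs; exact absurd hxs (by simp)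
  | false =>
    have hfree : ∀ x ∈ s, pvSep x = false := by
      intro x hx
      exact Bool.eq_false_iff.mpr (fun hc => by
        rw [List.any_eq_true.mpr ⟨x, hx, hc⟩] at hs; exact Bool.true_eq_false.mp hs)
    simp only [is_sequent_alt, hs, Bool.false_eq_true, if_false, List.any_eq_true]
    constructor
    · rintro ⟨i, hi, hfi⟩
      have hi' := (PySem.List.mem_pyRange_one).mp hi
      have h0 : (0:Int) ≤ i := hi'.1
      obtain ⟨j, rfl⟩ : ∃ j : Nat, (↑j : Int) = i := ⟨i.toNat, Int.toNat_of_nonneg h0⟩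
      rw [pvF_eq_anch l s j] at hfi
      exact ⟨hfree, j, hfi⟩
    · rintro ⟨-, j, hj⟩
      have hb := pvAnch_bound l s j hj
      refine ⟨(↑j : Int), PySem.List.mem_pyRange_one.mpr ⟨by positivity, by omega⟩, ?_⟩
      rw [pvF_eq_anch l s j]
      exact hj

-- ===== VERDICT (by name: the statement is the Claim_ definition above) =====
theorem is_sequent_spec : Claim_equal_is_sequent := by
  intro l s _
  unfold Spec_is_sequent
  rw [Bool.eq_iff_iff, isSequent_eq_mem, isSequentAlt_eq]
  constructor
  · intro hmem
    have hfree : ∀ x ∈ s, pvSep x = false := pvSegs_sepfree l s hmem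
    refine ⟨hfree, ?_⟩
    rw [pvSegs_cons l] at hmem
    rcases List.mem_cons.mp hmem with h | h
    · exact ⟨0, (pvAnch_segs l s hfree).1.mpr h.symm⟩
    · obtain ⟨j, hj⟩ := (pvAnch_segs l s hfree).2.mpr h
      exact ⟨j + 1, hj⟩
  · rintro ⟨hfree, j, hj⟩
    rw [pvSegs_cons l]
    cases j with
    | zero => exact List.mem_cons.mpr (Or.inl ((pvAnch_segs l s hfree).1.mp hj).symm)
    | succ k => exact List.mem_cons.mpr (Or.inr ((pvAnch_segs l s hfree).2.mp ⟨k, hj⟩))
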